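-- pv_equiv track=rewrite | github.com/Sixshaman/SolarTears | UtilsBuild/GenerateVulkanFunctionList.py | compile_cpp_header_h
-- ===== SOURCE A (Python) =====
-- header_start_h = """\
-- #pragma once
--
-- #include <vulkan/vulkan.h>
--
-- #ifdef VK_NO_PROTOTYPES
--
-- #define DECLARE_VULKAN_FUNCTION(funcName) extern PFN_##funcName funcName;
--
-- extern "C"
-- {
-- """
--
-- header_end = """\
-- }
--
-- #endif"""
--
-- def compile_cpp_header_h(funcs):
-- 	cpp_data = ""
--
-- 	cpp_data += header_start_h
--
-- 	current_extension_define = ""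
-- 	current_platform_define  = ""
-- 	tab_level                = ""
-- 	for func in funcs:
-- 		if current_extension_define != func[1] or current_platform_define != func[2]:
-- 			if current_extension_define != "" or current_platform_define != "":
-- 				cpp_data += "#endif\n"
-- 				tab_level = ""
--
-- 			if func[1] != "" or func[2] != "":
-- 				tab_level = "\t"
--
-- 				cpp_data += "\n#if "
--
-- 				if func[1] != "":
-- 					cpp_data += "defined(" + func[1] + ")"
--
-- 					if func[2] != "":
-- 						cpp_data += " && "
-- 					else:
-- 						cpp_data += "\n"
--
-- 				if func[2] != "":
-- 					cpp_data += "defined(" + func[2] + ")\n"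
--
-- 			current_extension_define = func[1]
-- 			current_platform_define  = func[2]
--
-- 		cpp_data += tab_level + "DECLARE_VULKAN_FUNCTION(" + func[0] + ")\n";
--
-- 	if current_extension_define != "" or current_platform_define != "":
-- 	    cpp_data += "#endif\n\n"
--
-- 	cpp_data += header_end
--
-- 	return cpp_data
-- ===== SOURCE B (Python) =====
-- from itertools import groupby
--
-- header_start_h = """\
-- #pragma once
--
-- #include <vulkan/vulkan.h>
--
-- #ifdef VK_NO_PROTOTYPES
--
-- #define DECLARE_VULKAN_FUNCTION(funcName) extern PFN_##funcName funcName;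
--
-- extern "C"
-- {
-- """
--
-- header_end = """\
-- }
--
-- #endif"""
--
-- def compile_cpp_header_h(funcs):
-- 	parts = [header_start_h]
-- 	groups = [(key, [f[0] for f in group])
-- 	          for key, group in groupby(funcs, key=lambda f: (f[1], f[2]))]
-- 	for i, ((ext, plat), names) in enumerate(groups):
-- 		guarded = ext != "" or plat != ""
-- 		if guarded:
-- 			cond = ""
-- 			if ext != "":
-- 				cond += "defined(" + ext + ")" + (" && " if plat != "" else "\n")
-- 			if plat != "":
-- 				cond += "defined(" + plat + ")\n"
-- 			parts.append("\n#if " + cond)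
-- 		tab = "\t" if guarded else ""
-- 		for name in names:
-- 			parts.append(tab + "DECLARE_VULKAN_FUNCTION(" + name + ")\n")
-- 		if guarded:
-- 			parts.append("#endif\n\n" if i == len(groups) - 1 else "#endif\n")
-- 	parts.append(header_end)
-- 	return "".join(parts)
-- ===== Notes on version B (the rewrite author's own statement) =====
-- stated objective: alternative
-- what changed: B first groups the function list into consecutive (extension, platform) runs (itertools.groupby) and then emits each guarded block as a unit with an explicit last-group flag, instead of A's single stateful loop tracking current defines and tab level.
import Mathlib
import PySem

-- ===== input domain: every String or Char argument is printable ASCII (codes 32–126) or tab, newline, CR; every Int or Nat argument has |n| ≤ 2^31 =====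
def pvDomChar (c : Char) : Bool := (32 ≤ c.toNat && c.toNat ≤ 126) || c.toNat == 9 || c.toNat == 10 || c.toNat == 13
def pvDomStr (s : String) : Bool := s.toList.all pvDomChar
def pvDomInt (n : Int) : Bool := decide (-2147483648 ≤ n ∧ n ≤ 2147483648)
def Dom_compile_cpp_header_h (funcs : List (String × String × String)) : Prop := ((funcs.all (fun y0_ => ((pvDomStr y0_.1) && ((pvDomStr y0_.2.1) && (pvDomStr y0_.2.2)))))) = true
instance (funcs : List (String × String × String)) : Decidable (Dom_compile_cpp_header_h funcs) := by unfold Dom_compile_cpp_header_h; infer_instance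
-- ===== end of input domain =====

-- B regroups the input into consecutive (extension, platform) runs first and emits each
-- guarded block as a unit (alternative decomposition; same cost as A).

def pvHeaderStartH : String :=
  "#pragma once\n\n#include <vulkan/vulkan.h>\n\n#ifdef VK_NO_PROTOTYPES\n\n#define DECLARE_VULKAN_FUNCTION(funcName) extern PFN_##funcName funcName;\n\nextern \"C\"\n{\n"

def pvHeaderEnd : String := "}\n\n#endif"

-- ===== PORT A =====
-- one iteration of A's for-loop; state = (cpp_data, current_extension_define, current_platform_define, tab_level)
def pvStepA (st : String × String × String × String) (func : String × String × String) :
    String × String × String × String :=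
  let cpp := st.1
  let ce := st.2.1
  let cp := st.2.2.1
  let tab := st.2.2.2
  if ce ≠ func.2.1 ∨ cp ≠ func.2.2 then
    let p1 : String × String := if ce ≠ "" ∨ cp ≠ "" then (cpp ++ "#endif\n", "") else (cpp, tab)
    let p2 : String × String :=
      if func.2.1 ≠ "" ∨ func.2.2 ≠ "" then
        let cpp2 := p1.1 ++ "\n#if "
        let cpp3 :=
          if func.2.1 ≠ "" then
            cpp2 ++ "defined(" ++ func.2.1 ++ ")" ++ (if func.2.2 ≠ "" then " && " else "\n")
          else cpp2
        let cpp4 := if func.2.2 ≠ "" then cpp3 ++ "defined(" ++ func.2.2 ++ ")\n" else cpp3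
        (cpp4, "\t")
      else p1
    (p2.1 ++ p2.2 ++ "DECLARE_VULKAN_FUNCTION(" ++ func.1 ++ ")\n", func.2.1, func.2.2, p2.2)
  else
    (cpp ++ tab ++ "DECLARE_VULKAN_FUNCTION(" ++ func.1 ++ ")\n", ce, cp, tab)

def compile_cpp_header_h (funcs : List (String × String × String)) : String :=
  let st := funcs.foldl pvStepA ("" ++ pvHeaderStartH, "", "", "")
  let cpp := if st.2.1 ≠ "" ∨ st.2.2.1 ≠ "" then st.1 ++ "#endif\n\n" else st.1
  cpp ++ pvHeaderEnd

-- ===== PORT B =====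
def pvKey (f : String × String × String) : String × String := (f.2.1, f.2.2)

-- itertools.groupby: consecutive runs with equal key, keeping only the function names
def pvRunsBy : List (String × String × String) → List ((String × String) × List String)
  | [] => []
  | f :: fs =>
    (pvKey f, f.1 :: (fs.takeWhile (fun g => decide (pvKey g = pvKey f))).map (fun g => g.1)) ::
      pvRunsBy (fs.dropWhile (fun g => decide (pvKey g = pvKey f)))
termination_by l => l.length
decreasing_by
  exact Nat.lt_succ_of_le (List.length_dropWhile_le _ _)

def pvGuardStr (k : String × String) : String :=
  (if k.1 ≠ "" then "defined(" ++ k.1 ++ ")" ++ (if k.2 ≠ "" then " && " else "\n") else "") ++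
  (if k.2 ≠ "" then "defined(" ++ k.2 ++ ")\n" else "")

def pvDecls (tab : String) : List String → String
  | [] => ""
  | n :: ns => tab ++ "DECLARE_VULKAN_FUNCTION(" ++ n ++ ")\n" ++ pvDecls tab ns

def pvEmit : List ((String × String) × List String) → String
  | [] => ""
  | (k, names) :: rest =>
    (if k.1 ≠ "" ∨ k.2 ≠ "" then "\n#if " ++ pvGuardStr k else "") ++
    pvDecls (if k.1 ≠ "" ∨ k.2 ≠ "" then "\t" else "") names ++
    (if k.1 ≠ "" ∨ k.2 ≠ "" then (if rest = [] then "#endif\n\n" else "#endif\n") else "") ++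
    pvEmit rest

def compile_cpp_header_h_alt (funcs : List (String × String × String)) : String :=
  pvHeaderStartH ++ pvEmit (pvRunsBy funcs) ++ pvHeaderEnd

-- ===== PRECONDITION & SPEC =====
def Spec_compile_cpp_header_h (funcs : List (String × String × String)) (out : String) : Prop := out = compile_cpp_header_h_alt funcs
instance (funcs : List (String × String × String)) (out : String) : Decidable (Spec_compile_cpp_header_h funcs out) := by unfold Spec_compile_cpp_header_h; infer_instance

-- ===== CLAIM (what is proved, stated in full; the proofs are below) =====
def Claim_equal_compile_cpp_header_h : Prop := ∀ (funcs : List (String × String × String)), Dom_compile_cpp_header_h funcs → Spec_compile_cpp_header_h funcs (compile_cpp_header_h funcs)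

-- ===== LEMMAS AND PROOFS =====

def pvTabOf (k : String × String) : String := if k.1 ≠ "" ∨ k.2 ≠ "" then "\t" else ""

-- the output chunk A's loop body appends for one element, given the previous key k
def pvHead (k : String × String) (f : String × String × String) : String :=
  (if pvKey f ≠ k then
     (if k.1 ≠ "" ∨ k.2 ≠ "" then "#endif\n" else "") ++
     (if (pvKey f).1 ≠ "" ∨ (pvKey f).2 ≠ "" then "\n#if " ++ pvGuardStr (pvKey f) else "")
   else "") ++
  pvTabOf (pvKey f) ++ "DECLARE_VULKAN_FUNCTION(" ++ f.1 ++ ")\n"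

-- the suffix A's loop (plus the trailing #endif) produces after the accumulator, given the previous key
def pvLoopF : (String × String) → List (String × String × String) → String
  | k, [] => if k.1 ≠ "" ∨ k.2 ≠ "" then "#endif\n\n" else ""
  | k, f :: fs => pvHead k f ++ pvLoopF (pvKey f) fs

theorem pvStepA_eq (acc ce cp : String) (f : String × String × String) :
    pvStepA (acc, ce, cp, pvTabOf (ce, cp)) f =
      (acc ++ pvHead (ce, cp) f, f.2.1, f.2.2, pvTabOf (pvKey f)) := by
  unfold pvStepA pvHead pvKey pvTabOf pvGuardStr
  by_cases h1 : ce ≠ f.2.1 ∨ cp ≠ f.2.2 <;>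
  by_cases h2 : ce ≠ "" ∨ cp ≠ "" <;>
  by_cases h3 : f.2.1 ≠ "" ∨ f.2.2 ≠ "" <;>
  by_cases h4 : f.2.1 ≠ "" <;>
  by_cases h5 : f.2.2 ≠ "" <;>
    simp_all [Prod.ext_iff, String.append_assoc] <;> (try tauto) <;>
    (split_ifs with h6) <;> (try simp_all [String.append_assoc]) <;> tauto

theorem pvA_loop (funcs : List (String × String × String)) (acc ce cp : String) :
    (let st := funcs.foldl pvStepA (acc, ce, cp, pvTabOf (ce, cp));
     (if st.2.1 ≠ "" ∨ st.2.2.1 ≠ "" then st.1 ++ "#endif\n\n" else st.1))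
      = acc ++ pvLoopF (ce, cp) funcs := by
  induction funcs generalizing acc ce cp with
  | nil =>
    simp only [List.foldl_nil, pvLoopF]
    split_ifs <;> simp_all
  | cons f fs ih =>
    simp only [List.foldl_cons, pvStepA_eq, pvLoopF]
    have := ih (acc ++ pvHead (ce, cp) f) f.2.1 f.2.2
    simp only [pvKey] at *
    rw [this, String.append_assoc]

theorem pvRunsBy_eq_nil (l : List (String × String × String)) : pvRunsBy l = [] ↔ l = [] := by
  cases l with
  | nil => rw [pvRunsBy]; simp
  | cons f fs => rw [pvRunsBy]; simp

theorem pvHead?_dropWhile {α : Type} (p : α → Bool) (l : List α) :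
    ∀ x ∈ (l.dropWhile p).head?, p x = false := by
  induction l with
  | nil => simp
  | cons a l ih =>
    intro x hx
    by_cases h : p a
    · simpa [List.dropWhile, h] using ih x (by simpa [List.dropWhile, h] using hx)
    · simp only [List.dropWhile, h] at hx
      simp at hx
      simp [hx ▸ h]

theorem pvLoopF_decls (g : List (String × String × String)) (k : String × String)
    (rest : List (String × String × String)) (hg : ∀ x ∈ g, pvKey x = k) :
    pvLoopF k (g ++ rest) = pvDecls (pvTabOf k) (g.map (fun x => x.1)) ++ pvLoopF k rest := by
  induction g with
  | nil => simp [pvDecls]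
  | cons x g ih =>
    have hx : pvKey x = k := hg x (by simp)
    simp only [List.cons_append, pvLoopF, List.map_cons, pvDecls, hx]
    rw [ih (fun y hy => hg y (by simp [hy]))]
    simp [pvHead, hx, String.append_assoc]

theorem pvLoopF_runs (n : Nat) (fs : List (String × String × String)) (k : String × String)
    (hn : fs.length ≤ n) (hk : ∀ f ∈ fs.head?, pvKey f = k → k = ("", "")) :
    pvLoopF k fs =
      (if k.1 ≠ "" ∨ k.2 ≠ "" then (if fs = [] then "#endif\n\n" else "#endif\n") else "") ++
        pvEmit (pvRunsBy fs) := by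
  induction n generalizing fs k with
  | zero =>
    have : fs = [] := List.eq_nil_of_length_eq_zero (Nat.le_zero.mp hn)
    subst this
    rw [pvRunsBy]
    simp [pvLoopF, pvEmit]
  | succ n ih =>
    cases fs with
    | nil =>
      rw [pvRunsBy]
      simp [pvLoopF, pvEmit]
    | cons f fs =>
      rw [pvRunsBy]
      set p : String × String × String → Bool := fun g => decide (pvKey g = pvKey f) with hp
      have hsplit : fs.takeWhile p ++ fs.dropWhile p = fs := List.takeWhile_append_dropWhile
      have hg : ∀ x ∈ fs.takeWhile p, pvKey x = pvKey f := by
        intro x hx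
        have := List.mem_takeWhile_imp hx
        simpa [hp] using this
      have hrest : ∀ x ∈ (fs.dropWhile p).head?, pvKey x = pvKey f → pvKey f = ("", "") := by
        intro x hx hxk
        have := pvHead?_dropWhile p fs x hx
        simp [hp, hxk] at this
      have hlen : (fs.dropWhile p).length ≤ n := by
        have h1 := List.length_dropWhile_le p fs
        have h2 : fs.length ≤ n := by simpa using Nat.le_of_succ_le_succ hn
        omega
      have ihr := ih (fs.dropWhile p) (pvKey f) hlen hrest
      have hloop : pvLoopF (pvKey f) fs
          = pvDecls (pvTabOf (pvKey f)) ((fs.takeWhile p).map (fun x => x.1))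
              ++ pvLoopF (pvKey f) (fs.dropWhile p) := by
        conv_lhs => rw [← hsplit]
        exact pvLoopF_decls _ _ _ hg
      simp only [pvLoopF, pvEmit, hloop, ihr, pvRunsBy_eq_nil, List.dropWhile_eq_nil_iff]
      by_cases hne : pvKey f = k
      · have hk0 : k = ("", "") := hk f (by simp) hne
        subst hk0
        simp [pvHead, hne, pvTabOf, pvDecls, String.append_assoc]
      · simp [pvHead, hne, pvTabOf, pvDecls, String.append_assoc]

-- ===== VERDICT (by name: the statement is the Claim_ definition above) =====
theorem compile_cpp_header_h_spec : Claim_equal_compile_cpp_header_h := by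
  intro funcs _
  unfold Spec_compile_cpp_header_h compile_cpp_header_h compile_cpp_header_h_alt
  have hA := pvA_loop funcs ("" ++ pvHeaderStartH) "" ""
  have hB := pvLoopF_runs funcs.length funcs ("", "") le_rfl (fun f _ _ => rfl)
  simp only [pvTabOf, ne_eq, not_true_eq_false, or_self, if_false] at hA hB
  simp only [hA, hB]
  simp [String.append_assoc]
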